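-- pv_equiv track=rewrite | github.com/deckerjulian/gamma-ray-trng | webapplication/nist_randomness_tests.py | _longest_run_in_block
-- ===== SOURCE A (Python) =====
-- def _longest_run_in_block(block):
--     """Helper function to find longest run of ones in a block."""
--     longest = 0
--     current = 0
--
--     for bit in block:
--         if bit == '1':
--             current += 1
--             longest = max(longest, current)
--         else:
--             current = 0
--
--     return longest
-- ===== SOURCE B (Python) =====
-- def _longest_run_in_block(block):
--     """Run-length decomposition: build maximal runs of equal bits, then take
--     the longest '1'-run (0 if there is none)."""
--     runs = []  # run-length encoding: list of (bit, length), in order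
--     for bit in block:
--         if runs and runs[-1][0] == bit:
--             runs[-1] = (bit, runs[-1][1] + 1)
--         else:
--             runs.append((bit, 1))
--     return max((n for k, n in runs if k == '1'), default=0)
-- ===== Notes on version B (the rewrite author's own statement) =====
-- stated objective: alternative
-- what changed: Replaces the running-counter-with-max single pass by a group-then-reduce decomposition: first build the run-length encoding of the block, then take the maximum length among the runs of ones (default 0).
import Mathlib
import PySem

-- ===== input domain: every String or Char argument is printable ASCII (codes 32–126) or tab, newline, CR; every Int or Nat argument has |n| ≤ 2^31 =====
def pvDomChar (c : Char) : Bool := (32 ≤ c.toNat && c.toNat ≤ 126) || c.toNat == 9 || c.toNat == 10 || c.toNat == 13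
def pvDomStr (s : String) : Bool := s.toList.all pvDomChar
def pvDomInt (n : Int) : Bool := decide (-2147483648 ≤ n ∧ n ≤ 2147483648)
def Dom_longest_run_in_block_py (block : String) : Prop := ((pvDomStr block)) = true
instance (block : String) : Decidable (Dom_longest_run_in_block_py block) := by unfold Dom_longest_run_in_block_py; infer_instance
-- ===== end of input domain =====

-- B replaces A's running-counter-with-max pass by a run-length-encode-then-reduce decomposition; alternative, same cost.
-- ===== PORT A =====
-- literal port of A's for-loop: state (longest, current), branches in source order
def longest_run_in_block_py (block : String) : Int :=
  (block.toList.foldl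
    (fun (s : Int × Int) bit =>
      if bit == '1' then (max s.1 (s.2 + 1), s.2 + 1) else (s.1, 0))
    (0, 0)).1

-- ===== PORT B =====
-- run-length encoding of the block (same list of (bit, length) groups, in order,
-- as Source B builds left-to-right; here by structural recursion)
def pvRuns : List Char → List (Char × Int)
  | [] => []
  | c :: cs =>
    match pvRuns cs with
    | (d, n) :: rest => if c == d then (c, n + 1) :: rest else (c, 1) :: (d, n) :: rest
    | [] => [(c, 1)]

-- max((n for k, n in runs if k == '1'), default=0)
def pvMaxOnes (rs : List (Char × Int)) : Int :=
  ((rs.filter (fun p => p.1 == '1')).map (fun p => p.2)).foldl max 0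

def longest_run_in_block_py_alt (block : String) : Int :=
  pvMaxOnes (pvRuns block.toList)

-- ===== PRECONDITION & SPEC =====
def Spec_longest_run_in_block_py (block : String) (out : Int) : Prop := out = longest_run_in_block_py_alt block
instance (block : String) (out : Int) : Decidable (Spec_longest_run_in_block_py block out) := by unfold Spec_longest_run_in_block_py; infer_instance

-- ===== CLAIM (what is proved, stated in full; the proofs are below) =====
def Claim_equal_longest_run_in_block_py : Prop := ∀ (block : String), Dom_longest_run_in_block_py block → Spec_longest_run_in_block_py block (longest_run_in_block_py block)

-- ===== LEMMAS AND PROOFS =====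

-- ===== VERDICT (by name: the statement is the Claim_ definition above) =====
-- helper for the proof: max-run value of a suffix given a pending '1'-run of length cur
def pvH : Int → List Char → Int
  | cur, [] => cur
  | cur, c :: rest => if c == '1' then pvH (cur + 1) rest else max cur (pvH 0 rest)

-- prepend a pending '1'-run of length cur to a run list
def pvConsRun (cur : Int) : List (Char × Int) → List (Char × Int)
  | [] => [('1', cur)]
  | (k, n) :: rest => if k == '1' then ('1', cur + n) :: rest else ('1', cur) :: (k, n) :: rest

theorem foldl_max_shift (xs : List Int) (a : Int) (ha : 0 ≤ a) :
    xs.foldl max a = max a (xs.foldl max 0) := by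
  induction xs generalizing a with
  | nil => simp [List.foldl]; omega
  | cons x xs ih =>
    simp only [List.foldl]
    rw [ih (max a x) (by omega), ih (max 0 x) (by omega)]
    omega

theorem foldl_max_nonneg (xs : List Int) (a : Int) (ha : 0 ≤ a) : 0 ≤ xs.foldl max a := by
  induction xs generalizing a with
  | nil => simpa
  | cons x xs ih => exact ih _ (by omega)

theorem pvMaxOnes_nonneg (rs : List (Char × Int)) : 0 ≤ pvMaxOnes rs :=
  foldl_max_nonneg _ _ le_rfl

theorem pvMaxOnes_cons (k : Char) (n : Int) (rs : List (Char × Int)) :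
    pvMaxOnes ((k, n) :: rs) = if k = '1' then max (max 0 n) (pvMaxOnes rs) else pvMaxOnes rs := by
  by_cases h : k = '1'
  · have hb : (k == '1') = true := by simp [h]
    simp [pvMaxOnes, List.filter, h, foldl_max_shift _ (max 0 n) (by omega)]
  · have hb : (k == '1') = false := by simp [h]
    simp [pvMaxOnes, List.filter, h, hb]

theorem le_pvH (l : List Char) (cur : Int) : cur ≤ pvH cur l := by
  induction l generalizing cur with
  | nil => simp [pvH]
  | cons c rest ih =>
    by_cases h : c = '1'
    · simp only [pvH, h]
      rw [if_pos (by decide)]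
      have := ih (cur + 1); omega
    · simp only [pvH]
      rw [if_neg (fun hh => h (eq_of_beq hh))]
      exact le_max_left _ _

theorem pvConsRun_zero (rs : List (Char × Int)) :
    pvMaxOnes (pvConsRun 0 rs) = pvMaxOnes rs := by
  cases rs with
  | nil => simp [pvConsRun, pvMaxOnes]
  | cons p rest =>
    obtain ⟨k, n⟩ := p
    by_cases hk : k = '1' <;>
      simp [pvConsRun, hk, pvMaxOnes_cons, pvMaxOnes_nonneg rest]

theorem pvH_eq_consRun (l : List Char) (cur : Int) (hc : 0 ≤ cur) :
    pvH cur l = pvMaxOnes (pvConsRun cur (pvRuns l)) := by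
  induction l generalizing cur with
  | nil => simp [pvH, pvRuns, pvConsRun, pvMaxOnes]; omega
  | cons c cs ih =>
    by_cases h : c = '1'
    · subst h
      simp only [pvH]
      rw [if_pos (by decide)]
      rw [ih (cur + 1) (by omega)]
      simp only [pvRuns]
      cases hr : pvRuns cs with
      | nil => simp [pvConsRun]
      | cons p rest =>
        obtain ⟨d, n⟩ := p
        by_cases hd : d = '1'
        · subst hd; simp [pvConsRun]; ring_nf
        · simp [pvConsRun, hd, Ne.symm hd]
    · simp only [pvH, if_neg (fun hh => h (eq_of_beq hh))]
      rw [ih 0 (by omega), pvConsRun_zero]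
      simp only [pvRuns]
      cases hr : pvRuns cs with
      | nil =>
        simp [pvConsRun, h, pvMaxOnes]
        omega
      | cons p rest =>
        obtain ⟨d, n⟩ := p
        by_cases hd : c = d
        · subst hd
          simp [pvConsRun, h, pvMaxOnes_cons, pvMaxOnes_nonneg rest]
        · have h1 := pvMaxOnes_nonneg rest
          simp [pvConsRun, hd, h, pvMaxOnes_cons]
          right
          split <;> omega

theorem loopA_eq (l : List Char) (longest cur : Int) (h0 : 0 ≤ cur) (h1 : cur ≤ longest) :
    (l.foldl (fun (s : Int × Int) bit =>
        if bit == '1' then (max s.1 (s.2 + 1), s.2 + 1) else (s.1, 0)) (longest, cur)).1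
      = max longest (pvH cur l) := by
  induction l generalizing longest cur with
  | nil => simp [pvH]; omega
  | cons c rest ih =>
    by_cases h : c = '1'
    · have hb : (c == '1') = true := by simp [h]
      simp only [List.foldl, pvH, hb, if_true]
      rw [ih (max longest (cur + 1)) (cur + 1) (by omega) (by omega)]
      have := le_pvH rest (cur + 1)
      omega
    · have hb : (c == '1') = false := by simp [h]
      simp only [List.foldl, pvH, hb, Bool.false_eq_true, if_false]
      rw [ih longest 0 (by omega) (by omega)]
      omega

theorem longest_run_in_block_py_spec : Claim_equal_longest_run_in_block_py := by
  intro block _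
  show longest_run_in_block_py block = longest_run_in_block_py_alt block
  unfold longest_run_in_block_py longest_run_in_block_py_alt
  rw [loopA_eq _ 0 0 le_rfl le_rfl, pvH_eq_consRun _ 0 le_rfl, pvConsRun_zero]
  have := pvMaxOnes_nonneg (pvRuns block.toList)
  omega
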